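-- pv_equiv track=rewrite | github.com/ShivramSriramulu/HackmerlinSpearbit | llm_extractor.py | _is_english_word
-- ===== SOURCE A (Python) =====
-- def _is_english_word(word):
--     """Basic check for English words - filter out obvious non-English patterns."""
--     # Filter out words that are clearly not English
--     non_english_patterns = [
--         len(word) < 3,  # Too short
--         len(word) > 12,  # Too long
--         any(c in word for c in ['QQ', 'XX', 'ZZ']),  # Uncommon letter combinations
--         word.count('Q') > 1,  # Too many Qs
--         word.count('X') > 1,  # Too many Xs
--         word.count('Z') > 1,  # Too many Zs
--     ]
--     return not any(non_english_patterns)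
-- ===== SOURCE B (Python) =====
-- def _is_english_word(word):
--     """Single pass over the characters: count Q/X/Z once; a doubled 'QQ'/'XX'/'ZZ'
--     already forces the corresponding count above 1, so no substring scan is needed."""
--     q = x = z = 0
--     for c in word:
--         if c == 'Q':
--             q += 1
--         elif c == 'X':
--             x += 1
--         elif c == 'Z':
--             z += 1
--     return 3 <= len(word) <= 12 and q <= 1 and x <= 1 and z <= 1
-- ===== Notes on version B (the rewrite author's own statement) =====
-- stated objective: simpler
-- what changed: Replaces A's four separate scans (a substring 'any' over ['QQ','XX','ZZ'] plus three .count calls) with one loop counting Q/X/Z, using the fact that a doubled rare letter already makes its count exceed 1, so the substring test is redundant.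
import Mathlib
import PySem

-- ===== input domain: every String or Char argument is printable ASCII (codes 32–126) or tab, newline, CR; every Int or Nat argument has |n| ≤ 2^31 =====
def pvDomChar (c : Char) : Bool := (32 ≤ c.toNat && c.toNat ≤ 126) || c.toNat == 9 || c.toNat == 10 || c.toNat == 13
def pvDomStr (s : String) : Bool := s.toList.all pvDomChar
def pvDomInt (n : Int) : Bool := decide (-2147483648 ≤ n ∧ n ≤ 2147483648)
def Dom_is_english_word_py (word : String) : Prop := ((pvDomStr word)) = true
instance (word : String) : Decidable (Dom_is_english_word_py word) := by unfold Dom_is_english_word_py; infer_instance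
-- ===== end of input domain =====

-- B replaces A's four scans (substring test + three counts) with one counting pass; equal on all inputs.


-- ===== PORT A =====
def is_english_word_py (word : String) : Bool :=
  let non_english_patterns : List Bool :=
    [ decide (PySem.Str.len word < 3),
      decide (PySem.Str.len word > 12),
      (["QQ", "XX", "ZZ"] : List String).any (fun c => PySem.Str.isIn c word),
      decide (PySem.Str.count word "Q" > 1),
      decide (PySem.Str.count word "X" > 1),
      decide (PySem.Str.count word "Z" > 1) ]
  !(non_english_patterns.any (fun b => b))

-- ===== PORT B =====
def is_english_word_py_alt (word : String) : Bool :=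
  let cnt := word.toList.foldl
    (fun (s : Nat × Nat × Nat) c =>
      if c = 'Q' then (s.1 + 1, s.2.1, s.2.2)
      else if c = 'X' then (s.1, s.2.1 + 1, s.2.2)
      else if c = 'Z' then (s.1, s.2.1, s.2.2 + 1)
      else s) (0, 0, 0)
  decide (3 ≤ PySem.Str.len word) && decide (PySem.Str.len word ≤ 12) &&
    decide (cnt.1 ≤ 1) && decide (cnt.2.1 ≤ 1) && decide (cnt.2.2 ≤ 1)

-- ===== PRECONDITION & SPEC =====
def Spec_is_english_word_py (word : String) (out : Bool) : Prop := out = is_english_word_py_alt word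
instance (word : String) (out : Bool) : Decidable (Spec_is_english_word_py word out) := by unfold Spec_is_english_word_py; infer_instance

-- ===== CLAIM (what is proved, stated in full; the proofs are below) =====
def Claim_equal_is_english_word_py : Prop := ∀ (word : String), Dom_is_english_word_py word → Spec_is_english_word_py word (is_english_word_py word)

-- ===== LEMMAS AND PROOFS =====

-- Python's s.count(sub) for a one-character sub is the character count.
theorem count_go_singleton (c : Char) (s : List Char) : ∀ (fuel acc : Nat), s.length ≤ fuel →
    PySem.Chars.count.go [c] fuel s acc = acc + s.count c := by
  induction s with
  | nil => intro fuel acc _; cases fuel <;> simp [PySem.Chars.count.go]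
  | cons h t ih =>
    intro fuel acc hf
    cases fuel with
    | zero => simp at hf
    | succ n =>
      simp only [PySem.Chars.count.go]
      by_cases hc : h = c
      · subst hc
        simp only [List.isPrefixOf, beq_self_eq_true, Bool.and_true, if_pos,
          List.length_cons, List.length_nil, List.drop_succ_cons, List.drop_zero]
        rw [ih n (acc + 1) (by simpa using hf)]
        simp
        omega
      · have hpre : ([c].isPrefixOf (h :: t)) = false := by
          simp [List.isPrefixOf]
          exact fun hh => hc hh.symm
        rw [hpre]
        simp only [Bool.false_eq_true, if_false]
        rw [ih n acc (by simpa using hf)]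
        simp [hc]

theorem chars_count_singleton (c : Char) (s : List Char) :
    PySem.Chars.count s [c] = s.count c := by
  simp only [PySem.Chars.count, List.isEmpty, Bool.false_eq_true, if_false]
  simpa using count_go_singleton c s s.length 0 le_rfl

-- a doubled letter as an infix forces at least two occurrences
theorem infix_pair_count (c : Char) (s : List Char) (h : [c, c] <:+: s) : 2 ≤ s.count c := by
  obtain ⟨l, r, rfl⟩ := h
  simp [List.count_append]
  omega

-- B's fold computes the three character counts
theorem fold_counts (s : List Char) (q x z : Nat) :
    s.foldl (fun (t : Nat × Nat × Nat) c =>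
      if c = 'Q' then (t.1 + 1, t.2.1, t.2.2)
      else if c = 'X' then (t.1, t.2.1 + 1, t.2.2)
      else if c = 'Z' then (t.1, t.2.1, t.2.2 + 1)
      else t) (q, x, z)
    = (q + s.count 'Q', x + s.count 'X', z + s.count 'Z') := by
  induction s generalizing q x z with
  | nil => simp
  | cons h t ih =>
    simp only [List.foldl_cons]
    by_cases hq : h = 'Q'
    · subst hq; rw [if_pos rfl, ih]; simp; omega
    · rw [if_neg hq]
      by_cases hx : h = 'X'
      · subst hx; rw [if_pos rfl, ih]; simp; omega
      · rw [if_neg hx]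
        by_cases hz : h = 'Z'
        · subst hz; rw [if_pos rfl, ih]
          simp
          omega
        · rw [if_neg hz, ih]
          simp [hq, hx, hz]

-- ===== VERDICT (by name: the statement is the Claim_ definition above) =====
theorem is_english_word_py_spec : Claim_equal_is_english_word_py := by
  intro word _
  unfold Spec_is_english_word_py is_english_word_py is_english_word_py_alt
  have hQs : "Q".toList = ['Q'] := rfl
  have hXs : "X".toList = ['X'] := rfl
  have hZs : "Z".toList = ['Z'] := rfl
  have hQQ : "QQ".toList = ['Q', 'Q'] := rfl
  have hXX : "XX".toList = ['X', 'X'] := rfl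
  have hZZ : "ZZ".toList = ['Z', 'Z'] := rfl
  simp only [List.any_cons, List.any_nil, Bool.or_false, PySem.Str.count_eq, PySem.Str.isIn_eq,
    PySem.Str.len_eq, fold_counts, hQs, hXs, hZs, hQQ, hXX, hZZ, chars_count_singleton,
    Nat.zero_add]
  rcases hiq : PySem.Chars.isIn ['Q', 'Q'] word.toList with _ | _
  case false =>
    rcases hix : PySem.Chars.isIn ['X', 'X'] word.toList with _ | _
    case false =>
      rcases hiz : PySem.Chars.isIn ['Z', 'Z'] word.toList with _ | _
      case false =>
        rw [Bool.eq_iff_iff]; simp; omega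
      case true =>
        have := infix_pair_count 'Z' word.toList ((PySem.Chars.isIn_iff_infix _ _).mp hiz)
        rw [Bool.eq_iff_iff]; simp; omega
    case true =>
      have := infix_pair_count 'X' word.toList ((PySem.Chars.isIn_iff_infix _ _).mp hix)
      rw [Bool.eq_iff_iff]; simp; omega
  case true =>
    have := infix_pair_count 'Q' word.toList ((PySem.Chars.isIn_iff_infix _ _).mp hiq)
    rw [Bool.eq_iff_iff]; simp; omega
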